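-- pv_equiv track=rewrite | github.com/koba925/alds | atcoder/ABC188/D.py | sunuke_prime_mine
-- ===== SOURCE A (Python) =====
-- from collections import defaultdict
--
-- def sunuke_prime_mine(N, C, services):
--
--     costs = defaultdict(int)
--     for i in range(N):
--         costs[services[i][0]] += services[i][2]
--         costs[services[i][1] + 1] -= services[i][2]
--
--     total = 0
--     dates = sorted(costs.keys())
--     for i in range(len(dates) - 1):
--         costs[dates[i + 1]] += costs[dates[i]]
--     for i in range(len(dates) - 1):
--         total += min(C, costs[dates[i]]) * (dates[i + 1] - dates[i])
--
--     return total
-- ===== SOURCE B (Python) =====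
-- def sunuke_prime_mine(N, C, services):
--     # Brute-force segment stabbing: sorted breakpoints, then recompute the active cost
--     # of each segment directly from the services (started-minus-ended scan), no dict,
--     # no prefix-sum pass, no running accumulator.
--     svc = [services[i] for i in range(N)]
--     days = sorted({x for a, b, c in svc for x in (a, b + 1)})
--     total = 0
--     for d, nxt in zip(days, days[1:]):
--         started = sum(c for a, b, c in svc if a <= d)
--         ended = sum(c for a, b, c in svc if b < d)
--         total += min(C, started - ended) * (nxt - d)
--     return total
-- ===== Notes on version B (the rewrite author's own statement) =====
-- stated objective: alternative
-- what changed: Replaces A's defaultdict delta map with its in-dict prefix-sum pass and summation pass by per-segment brute force: sort the distinct breakpoints once and, for each segment, recompute the active cost from scratch by scanning all services (total started minus total ended), so no delta dictionary and no prefix accumulation exist at all.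
import Mathlib
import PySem

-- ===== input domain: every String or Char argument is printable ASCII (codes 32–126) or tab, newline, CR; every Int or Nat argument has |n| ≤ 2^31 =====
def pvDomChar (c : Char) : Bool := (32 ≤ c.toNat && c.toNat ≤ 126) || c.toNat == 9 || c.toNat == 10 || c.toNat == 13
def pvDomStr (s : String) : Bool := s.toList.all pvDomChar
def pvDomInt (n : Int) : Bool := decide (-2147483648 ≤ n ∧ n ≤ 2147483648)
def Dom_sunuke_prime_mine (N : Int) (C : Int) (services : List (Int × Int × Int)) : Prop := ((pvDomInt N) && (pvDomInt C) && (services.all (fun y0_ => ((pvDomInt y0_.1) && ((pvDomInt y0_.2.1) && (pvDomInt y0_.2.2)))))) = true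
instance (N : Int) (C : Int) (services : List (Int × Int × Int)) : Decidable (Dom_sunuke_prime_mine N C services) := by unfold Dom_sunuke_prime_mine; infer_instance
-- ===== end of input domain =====

-- B replaces A's delta dictionary + in-dict prefix-sum pass + summation pass by per-segment
-- brute force: sorted distinct breakpoints, active cost of each segment recomputed from
-- scratch by scanning all services (alternative decomposition, O(n^2) instead of O(n log n)).

-- ===== PORT A =====
-- helper: one loop step reading xs[i] (none = IndexError, excluded by Pre_)
def pvIdxStep {α β : Type} (xs : List α) (f : β → α → β) (acc : β) (i : Int) : β :=
  match PySem.List.pyGet? xs i with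
  | some x => f acc x
  | none => acc

-- helper: one loop step reading ds[i] and ds[i+1] (the none branches are unreachable: 0 ≤ i < len-1)
def pvIdx2Step {β : Type} (ds : List Int) (f : β → Int → Int → β) (acc : β) (i : Int) : β :=
  match PySem.List.pyGet? ds (i + 1), PySem.List.pyGet? ds i with
  | some k1, some k0 => f acc k0 k1
  | _, _ => acc

def sunuke_prime_mine (N : Int) (C : Int) (services : List (Int × Int × Int)) : Int :=
  -- costs = defaultdict(int); for i in range(N): costs[services[i][0]] += services[i][2]; costs[services[i][1]+1] -= services[i][2]
  let costs : PySem.Dict Int Int :=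
    (PySem.List.pyRange 0 N).foldl (pvIdxStep services (fun d s =>
      let d := d.insert s.1 (d.getD s.1 0 + s.2.2)
      d.insert (s.2.1 + 1) (d.getD (s.2.1 + 1) 0 - s.2.2))) PySem.Dict.empty
  let dates := PySem.List.sorted costs.keys (fun x => x)
  -- for i in range(len(dates)-1): costs[dates[i+1]] += costs[dates[i]]
  let costs :=
    (PySem.List.pyRange 0 ((dates.length : Int) - 1)).foldl
      (pvIdx2Step dates (fun d k0 k1 => d.insert k1 (d.getD k1 0 + d.getD k0 0))) costs
  -- for i in range(len(dates)-1): total += min(C, costs[dates[i]]) * (dates[i+1]-dates[i])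
  (PySem.List.pyRange 0 ((dates.length : Int) - 1)).foldl
    (pvIdx2Step dates (fun t k0 k1 => t + min C (costs.getD k0 0) * (k1 - k0))) 0

-- ===== PORT B =====
def sunuke_prime_mine_alt (N : Int) (C : Int) (services : List (Int × Int × Int)) : Int :=
  -- svc = [services[i] for i in range(N)]
  let svc : List (Int × Int × Int) :=
    (PySem.List.pyRange 0 N).foldl (pvIdxStep services (fun acc s => acc ++ [s])) []
  -- days = sorted({x for a, b, c in svc for x in (a, b + 1)})
  let days := PySem.List.sorted
    (PySem.Set.ofList (svc.flatMap (fun s => [s.1, s.2.1 + 1]))) (fun x => x)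
  -- for d, nxt in zip(days, days[1:]): total += min(C, started - ended) * (nxt - d)
  (days.zip (PySem.List.slice days (some 1) none)).foldl (fun t q =>
    let started := ((svc.filter (fun s => s.1 ≤ q.1)).map (fun s => s.2.2)).sum
    let ended := ((svc.filter (fun s => s.2.1 < q.1)).map (fun s => s.2.2)).sum
    t + min C (started - ended) * (q.2 - q.1)) 0

-- ===== PRECONDITION & SPEC =====
-- A raises IndexError iff N > len(services); Pre_ excludes exactly those inputs.
def Pre_sunuke_prime_mine (N : Int) (C : Int) (services : List (Int × Int × Int)) : Prop :=
  N ≤ (services.length : Int)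
instance (N : Int) (C : Int) (services : List (Int × Int × Int)) : Decidable (Pre_sunuke_prime_mine N C services) := by unfold Pre_sunuke_prime_mine; infer_instance

def pvWitness_sunuke_prime_mine : Int × Int × (List (Int × Int × Int)) := (2, 6, [(1, 2, 4), (2, 3, 5)])

def Spec_sunuke_prime_mine (N : Int) (C : Int) (services : List (Int × Int × Int)) (out : Int) : Prop := out = sunuke_prime_mine_alt N C services
instance (N : Int) (C : Int) (services : List (Int × Int × Int)) (out : Int) : Decidable (Spec_sunuke_prime_mine N C services out) := by unfold Spec_sunuke_prime_mine; infer_instance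

-- ===== CLAIM (what is proved, stated in full; the proofs are below) =====
def Claim_equal_sunuke_prime_mine : Prop := ∀ (N : Int) (C : Int) (services : List (Int × Int × Int)), Dom_sunuke_prime_mine N C services → Pre_sunuke_prime_mine N C services → Spec_sunuke_prime_mine N C services (sunuke_prime_mine N C services)

-- ===== LEMMAS AND PROOFS =====

-- the two events of one service
def pvEv2 (s : Int × Int × Int) : List (Int × Int) := [(s.1, s.2.2), (s.2.1 + 1, -s.2.2)]

-- net delta contributed at day k by the event list l
def pvSumAt (k : Int) (l : List (Int × Int)) : Int :=
  ((l.filter (fun p => p.1 == k)).map Prod.snd).sum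

theorem pyRange_neg_nil {N : Int} (h : N ≤ 0) : PySem.List.pyRange 0 N = [] := by
  apply List.eq_nil_iff_forall_not_mem.mpr
  intro x hx
  rw [PySem.List.mem_pyRange_one] at hx
  omega

theorem foldl_range_get {α β : Type} [Inhabited α] (xs : List α) (N : Int)
    (h : N ≤ (xs.length : Int)) (f : β → α → β) (init : β) :
    (PySem.List.pyRange 0 N).foldl (pvIdxStep xs f) init
    = (xs.take N.toNat).foldl f init := by
  by_cases hN : N ≤ 0
  · rw [pyRange_neg_nil hN]
    have : N.toNat = 0 := by omega
    simp [this]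
  · have hlen : (xs.take N.toNat).length = N.toNat := by
      simp [List.length_take]; omega
    have hr : PySem.List.pyRange 0 N
        = PySem.List.pyRange 0 (((xs.take N.toNat).length : Nat) : Int) := by
      rw [hlen]; congr 1; omega
    rw [hr]
    rw [PySem.List.foldl_congr_mem _ _
      (fun acc j => f acc (PySem.List.pyGetD (xs.take N.toNat) j default)) init ?_]
    · exact PySem.List.foldl_pyRange_zero_pyGetD' (xs.take N.toNat) default f init
    · intro acc x hx
      rw [PySem.List.mem_pyRange_one] at hx
      obtain ⟨hx0, hx1⟩ := hx
      obtain ⟨n, rfl⟩ : ∃ n : Nat, x = (n : Int) := ⟨x.toNat, by omega⟩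
      have hn : n < (xs.take N.toNat).length := by exact_mod_cast hx1
      have hxlen : n < xs.length := by
        have := hlen; omega
      have e : PySem.List.pyGet? xs ((n : Nat) : Int) = some xs[n] := by
        rw [PySem.List.pyGet?_natCast]
        exact List.getElem?_eq_getElem hxlen
      simp only [pvIdxStep, e]
      rw [PySem.List.pyGetD_eq_getElem _ _ (by positivity) (by exact_mod_cast hn)]
      simp only [Int.toNat_natCast]
      rw [List.getElem_take]

theorem range_adj {β : Type} (ds : List Int) (f : β → Int → Int → β) (init : β) :
    (PySem.List.pyRange 0 ((ds.length : Int) - 1)).foldl (pvIdx2Step ds f) init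
    = (ds.zip ds.tail).foldl (fun acc q => f acc q.1 q.2) init := by
  cases hn : ds.length with
  | zero =>
    have hds : ds = [] := List.length_eq_zero_iff.mp hn
    subst hds
    rw [pyRange_neg_nil (by norm_num)]
    simp
  | succ m =>
    have h1 : (((m + 1 : Nat)) : Int) - 1 = ((m : Nat) : Int) := by push_cast; ring
    rw [h1, PySem.List.pyRange_zero_natCast, List.foldl_map]
    have hzip : ds.zip ds.tail = (List.range m).map (fun j => (ds.getD j 0, ds.getD (j + 1) 0)) := by
      apply List.ext_getElem
      · simp [List.length_zip, List.length_tail, hn]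
      · intro i hi1 hi2
        have him : i < m := by
          simp only [List.length_zip, List.length_tail, hn] at hi1
          omega
        have hi : i < ds.length := by omega
        have hi' : i + 1 < ds.length := by omega
        simp [List.getElem_zip, List.getElem_map, List.getElem_range, List.getElem_tail,
          List.getD_eq_getElem?_getD, List.getElem?_eq_getElem hi, List.getElem?_eq_getElem hi']
    rw [hzip, List.foldl_map]
    apply PySem.List.foldl_congr_mem
    intro acc j hj
    have hjm : j < m := List.mem_range.mp hj
    have hj1 : j < ds.length := by omega
    have hj2 : j + 1 < ds.length := by omega
    have e1 : PySem.List.pyGet? ds ((j : Int) + 1) = some ds[j + 1] := by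
      rw [show ((j : Int) + 1) = ((j + 1 : Nat) : Int) by push_cast; ring,
        PySem.List.pyGet?_natCast]
      exact List.getElem?_eq_getElem hj2
    have e0 : PySem.List.pyGet? ds (j : Int) = some ds[j] := by
      rw [PySem.List.pyGet?_natCast]
      exact List.getElem?_eq_getElem hj1
    simp [pvIdx2Step, e1, e0, List.getD_eq_getElem?_getD, List.getElem?_eq_getElem hj1,
      List.getElem?_eq_getElem hj2]

-- ---- pvSumAt facts ----

theorem pvSumAt_nil (k : Int) : pvSumAt k [] = 0 := rfl

theorem pvSumAt_cons (k : Int) (p : Int × Int) (l : List (Int × Int)) :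
    pvSumAt k (p :: l) = (if p.1 = k then p.2 else 0) + pvSumAt k l := by
  simp only [pvSumAt, List.filter_cons]
  by_cases h : p.1 = k <;> simp [h]

-- ---- A's delta dictionary holds pvSumAt ----

theorem dict_foldl_getD (l : List (Int × Int)) :
    ∀ (d : PySem.Dict Int Int) (k : Int),
    (l.foldl (fun d p => d.insert p.1 (d.getD p.1 0 + p.2)) d).getD k 0
    = d.getD k 0 + pvSumAt k l := by
  induction l with
  | nil => intro d k; simp [pvSumAt]
  | cons p t ih =>
    intro d k
    rw [List.foldl_cons, ih, pvSumAt_cons]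
    rw [PySem.Dict.getD_insert]
    by_cases h : k = p.1
    · simp [h]; ring
    · have : ¬ (p.1 = k) := fun hh => h hh.symm
      simp [h, this]

theorem zipfold_untouched (zs : List (Int × Int)) :
    ∀ (D : PySem.Dict Int Int) (k : Int), (∀ q ∈ zs, q.2 ≠ k) →
    ((zs.foldl (fun d q => d.insert q.2 (d.getD q.2 0 + d.getD q.1 0)) D)).getD k 0 = D.getD k 0 := by
  induction zs with
  | nil => intro D k _; rfl
  | cons q t ih =>
    intro D k h
    rw [List.foldl_cons, ih _ _ (fun x hx => h x (by simp [hx]))]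
    exact PySem.Dict.getD_insert_of_ne _ _ _ (Ne.symm (h q (by simp)))

-- A's prefix-sum chain loop: afterwards each day of D holds the sum of all inits at days ≤ it
theorem chain_getD : ∀ (D : List Int), D.Pairwise (· < ·) →
    ∀ (init : PySem.Dict Int Int) (d : Int), d ∈ D →
    ((D.zip D.tail).foldl (fun dd q => dd.insert q.2 (dd.getD q.2 0 + dd.getD q.1 0)) init).getD d 0
    = ((D.filter (fun k => k ≤ d)).map (fun k => init.getD k 0)).sum := by
  intro D
  induction D with
  | nil => intro _ init d hd; cases hd
  | cons d0 D' ih =>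
    intro hp init d hd
    obtain ⟨h0, hp'⟩ := List.pairwise_cons.mp hp
    cases D' with
    | nil =>
      simp only [List.mem_singleton] at hd
      subst hd
      simp
    | cons d1 rest =>
      have hzip : (d0 :: d1 :: rest).zip (d0 :: d1 :: rest).tail
          = (d0, d1) :: ((d1 :: rest).zip (d1 :: rest).tail) := rfl
      rw [hzip, List.foldl_cons]
      set init' := init.insert d1 (init.getD d1 0 + init.getD d0 0) with hinit'
      rcases List.mem_cons.mp hd with rfl | hd'
      · -- d = d0: untouched by every later insert (all keys > d0)
        have hunt : ∀ q ∈ (d1 :: rest).zip (d1 :: rest).tail, q.2 ≠ d := by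
          intro q hq
          have hq2 : q.2 ∈ rest := by simpa using (List.of_mem_zip hq).2
          have := h0 q.2 (by simp [hq2])
          omega
        rw [zipfold_untouched _ _ _ hunt]
        rw [hinit', PySem.Dict.getD_insert_of_ne _ _ _ (by have := h0 d1 (by simp); omega)]
        have hfilt : (d :: d1 :: rest).filter (fun k => k ≤ d) = [d] := by
          rw [List.filter_cons_of_pos (by simp)]
          rw [List.filter_eq_nil_iff.mpr ?_]
          intro k hk
          have := h0 k hk
          simp; omega
        rw [hfilt]; simp
      · -- d ∈ d1 :: rest: induction hypothesis with init'
        rw [ih hp' init' d hd']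
        have hd1d : d1 ≤ d := by
          rcases List.mem_cons.mp hd' with rfl | hdr
          · exact le_refl _
          · exact le_of_lt ((List.pairwise_cons.mp hp').1 d hdr)
        have hd0d : d0 ≤ d := le_of_lt (h0 d hd')
        have hf1 : (d1 :: rest).filter (fun k => k ≤ d) = d1 :: rest.filter (fun k => k ≤ d) :=
          List.filter_cons_of_pos (by simpa using hd1d)
        have hf0 : (d0 :: d1 :: rest).filter (fun k => k ≤ d)
            = d0 :: d1 :: rest.filter (fun k => k ≤ d) := by
          rw [List.filter_cons_of_pos (by simpa using hd0d), hf1]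
        rw [hf1, hf0]
        simp only [List.map_cons, List.sum_cons]
        have hrest_ne : ∀ k ∈ rest.filter (fun k => k ≤ d), k ≠ d1 ∧ k ≠ d0 := by
          intro k hk
          have hk' := List.mem_of_mem_filter hk
          have h1 := (List.pairwise_cons.mp hp').1 k hk'
          have h2 := h0 k (by simp [hk'])
          omega
        have hmaps : (rest.filter (fun k => k ≤ d)).map (fun k => init'.getD k 0)
            = (rest.filter (fun k => k ≤ d)).map (fun k => init.getD k 0) := by
          apply List.map_congr_left
          intro k hk
          exact PySem.Dict.getD_insert_of_ne _ _ _ (hrest_ne k hk).1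
        rw [hmaps]
        have h1 : init'.getD d1 0 = init.getD d1 0 + init.getD d0 0 :=
          PySem.Dict.getD_insert_self _ _ _ _
        rw [h1]
        ring

-- sum of if-matches over a nodup list
theorem sum_map_ite_nodup (a v : Int) : ∀ (l : List Int), l.Nodup →
    (l.map (fun k => if a = k then v else 0)).sum = if a ∈ l then v else 0 := by
  intro l
  induction l with
  | nil => simp
  | cons x t ih =>
    intro hnd
    obtain ⟨hx, ht⟩ := List.nodup_cons.mp hnd
    simp only [List.map_cons, List.sum_cons, ih ht, List.mem_cons]
    by_cases h : a = x
    · subst h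
      simp [if_neg hx]
    · simp [h]

-- summing pvSumAt over all days ≤ x equals summing the deltas of events at days ≤ x
theorem day_sum (D : List Int) (hnd : D.Nodup) (x : Int) :
    ∀ (evs : List (Int × Int)), (∀ e ∈ evs, e.1 ∈ D) →
    ((D.filter (fun k => k ≤ x)).map (fun k => pvSumAt k evs)).sum
    = ((evs.filter (fun e => e.1 ≤ x)).map Prod.snd).sum := by
  intro evs
  induction evs with
  | nil =>
    intro _
    simp [pvSumAt_nil]
  | cons e t ih =>
    intro hmem
    have hsplit : ((D.filter (fun k => k ≤ x)).map (fun k => pvSumAt k (e :: t))).sum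
        = ((D.filter (fun k => k ≤ x)).map (fun k => if e.1 = k then e.2 else 0)).sum
          + ((D.filter (fun k => k ≤ x)).map (fun k => pvSumAt k t)).sum := by
      rw [← List.sum_map_add]
      apply congrArg
      apply List.map_congr_left
      intro k _
      rw [pvSumAt_cons]
    rw [hsplit, ih (fun q hq => hmem q (by simp [hq]))]
    rw [sum_map_ite_nodup _ _ _ (List.Nodup.filter _ hnd)]
    have he1 : e.1 ∈ D := hmem e (by simp)
    by_cases hle : e.1 ≤ x <;>
      simp [hle, List.mem_filter, he1]

-- the event-delta prefix sum is "started minus ended" over the services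
theorem ev_split (x : Int) : ∀ (svc : List (Int × Int × Int)),
    (((svc.flatMap pvEv2).filter (fun e => e.1 ≤ x)).map Prod.snd).sum
    = ((svc.filter (fun s => s.1 ≤ x)).map (fun s => s.2.2)).sum
      - ((svc.filter (fun s => s.2.1 < x)).map (fun s => s.2.2)).sum := by
  intro svc
  induction svc with
  | nil => simp
  | cons s t ih =>
    rw [List.flatMap_cons, List.filter_append, List.map_append, List.sum_append, ih]
    have hco : (s.2.1 < x) ↔ (s.2.1 + 1 ≤ x) := Int.lt_iff_add_one_le
    simp only [pvEv2, List.filter_cons, List.filter_nil]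
    by_cases h1 : s.1 ≤ x <;> by_cases h2 : s.2.1 + 1 ≤ x <;>
      simp [h1, h2, hco] <;> ring

-- ---- main equivalence ----

theorem main_eq (N : Int) (C : Int) (services : List (Int × Int × Int))
    (hpre : N ≤ (services.length : Int)) :
    sunuke_prime_mine N C services = sunuke_prime_mine_alt N C services := by
  unfold sunuke_prime_mine sunuke_prime_mine_alt
  dsimp only
  rw [foldl_range_get services N hpre _ PySem.Dict.empty,
      foldl_range_get services N hpre _ ([] : List (Int × Int × Int))]
  rw [PySem.List.foldl_append_singleton, List.nil_append]
  set svc := services.take N.toNat with hsvc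
  -- A's dict loop builds exactly the deltas of the flattened events
  have hdict : svc.foldl
      (fun d (s : Int × Int × Int) =>
        let d' := d.insert s.1 (d.getD s.1 0 + s.2.2)
        d'.insert (s.2.1 + 1) (d'.getD (s.2.1 + 1) 0 - s.2.2)) PySem.Dict.empty
      = (svc.flatMap pvEv2).foldl
        (fun d p => d.insert p.1 (d.getD p.1 0 + p.2)) PySem.Dict.empty := by
    rw [List.foldl_flatMap]
    apply PySem.List.foldl_congr_mem
    intro acc s _
    simp [pvEv2, sub_eq_add_neg]
  rw [hdict]
  set evs := svc.flatMap pvEv2 with hevs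
  set dict1 := evs.foldl (fun d p => d.insert p.1 (d.getD p.1 0 + p.2)) PySem.Dict.empty with hdict1
  have hkeys : dict1.keys = PySem.Set.ofList (evs.map Prod.fst) := by
    rw [hdict1, PySem.Dict.keys_foldl_insert_key evs Prod.fst (fun d p => d.getD p.1 0 + p.2),
      PySem.Dict.keys_empty, PySem.Set.update_nil_left]
  -- A's date list and B's day list are the same sorted distinct-breakpoint list
  have hmapfst : evs.map Prod.fst = svc.flatMap (fun s => [s.1, s.2.1 + 1]) := by
    rw [hevs, List.map_flatMap]
    rfl
  rw [hkeys, hmapfst]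
  set D := PySem.List.sorted
    (PySem.Set.ofList (svc.flatMap (fun s => [s.1, s.2.1 + 1]))) (fun x => x) with hD
  have hDlt : D.Pairwise (· < ·) := PySem.List.sorted_ofList_pairwise_lt _
  have hDnd : D.Nodup := hDlt.imp ne_of_lt
  have hDmem : ∀ e ∈ evs, e.1 ∈ D := by
    intro e he
    rw [hD, PySem.List.mem_sorted, PySem.Set.mem_ofList, ← hmapfst]
    exact List.mem_map_of_mem he
  have hgetD : ∀ k, dict1.getD k 0 = pvSumAt k evs := by
    intro k
    rw [hdict1, dict_foldl_getD]
    simp [PySem.Dict.getD_empty]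
  rw [range_adj D (fun d k0 k1 => d.insert k1 (d.getD k1 0 + d.getD k0 0)) dict1,
      range_adj D _ 0, PySem.List.slice_from_one]
  apply PySem.List.foldl_congr_mem
  intro acc q hq
  have hq1 : q.1 ∈ D := (List.of_mem_zip hq).1
  rw [chain_getD D hDlt dict1 q.1 hq1]
  have hmaps : (D.filter (fun k => k ≤ q.1)).map (fun k => dict1.getD k 0)
      = (D.filter (fun k => k ≤ q.1)).map (fun k => pvSumAt k evs) := by
    apply List.map_congr_left
    intro k _
    exact hgetD k
  rw [hmaps, day_sum D hDnd q.1 evs hDmem, hevs, ev_split]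

-- ===== VERDICT (by name: the statement is the Claim_ definition above) =====
theorem sunuke_prime_mine_spec : Claim_equal_sunuke_prime_mine := by
  intro N C services _ hpre
  unfold Spec_sunuke_prime_mine
  exact main_eq N C services hpre
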